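-- pv_equiv track=rewrite | github.com/qxz-coder/VersionSeek | ResponseProcessing/Dubbo/greedy.py | heuristic_sort_probes
-- ===== SOURCE A (Python) =====
-- def split_versions(version_set, version_sets_by_probe):
--
--     remaining_versions = version_set.copy()
--     new_sets = []
--
--
--     for v_set in version_sets_by_probe:
--         intersection = version_set.intersection(v_set)
--         if intersection:
--             new_sets.append(intersection)
--             remaining_versions -= intersection
--
--     if remaining_versions:
--         new_sets.append(remaining_versions)
--
--     return new_sets
--
-- def heuristic_sort_probes(probe_data, remaining_set, chosen_probes):
--
--     def split_effectiveness(probe):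
--         version_sets = probe_data[probe]
--         new_sets = []
--         for v_set in remaining_set:
--             new_sets.extend(split_versions(v_set, version_sets))
--         return len(new_sets) - len(remaining_set)
--
--     effective_probes = [
--         probe for probe in probe_data.keys() if split_effectiveness(probe) > 0 and probe not in chosen_probes
--     ]
--
--     return sorted(effective_probes, key=split_effectiveness, reverse=True)
-- ===== SOURCE B (Python) =====
-- def heuristic_sort_probes(probe_data, remaining_set, chosen_probes):
--     # Count the split pieces arithmetically instead of materialising the
--     # intersection sets, and compute each probe's effectiveness once into a
--     # table instead of twice (filter + sort key).
--     def effectiveness(version_sets):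
--         pieces = 0
--         for vset in remaining_set:
--             pieces += sum(1 for vs in version_sets if any(x in vs for x in vset))
--             if any(all(x not in vs for vs in version_sets) for x in vset):
--                 pieces += 1
--         return pieces - len(remaining_set)
--
--     eff = {probe: effectiveness(vsets) for probe, vsets in probe_data.items()}
--     effective = [p for p in probe_data if eff[p] > 0 and p not in chosen_probes]
--     return sorted(effective, key=eff.__getitem__, reverse=True)
-- ===== Notes on version B (the rewrite author's own statement) =====
-- stated objective: alternative
-- what changed: B computes each probe's effectiveness once into a table (instead of twice, for the filter and again as the sort key) and computes it arithmetically (counting intersecting version sets and testing for leftover versions with any/all) instead of materialising every intersection set and the split list.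
import Mathlib
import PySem

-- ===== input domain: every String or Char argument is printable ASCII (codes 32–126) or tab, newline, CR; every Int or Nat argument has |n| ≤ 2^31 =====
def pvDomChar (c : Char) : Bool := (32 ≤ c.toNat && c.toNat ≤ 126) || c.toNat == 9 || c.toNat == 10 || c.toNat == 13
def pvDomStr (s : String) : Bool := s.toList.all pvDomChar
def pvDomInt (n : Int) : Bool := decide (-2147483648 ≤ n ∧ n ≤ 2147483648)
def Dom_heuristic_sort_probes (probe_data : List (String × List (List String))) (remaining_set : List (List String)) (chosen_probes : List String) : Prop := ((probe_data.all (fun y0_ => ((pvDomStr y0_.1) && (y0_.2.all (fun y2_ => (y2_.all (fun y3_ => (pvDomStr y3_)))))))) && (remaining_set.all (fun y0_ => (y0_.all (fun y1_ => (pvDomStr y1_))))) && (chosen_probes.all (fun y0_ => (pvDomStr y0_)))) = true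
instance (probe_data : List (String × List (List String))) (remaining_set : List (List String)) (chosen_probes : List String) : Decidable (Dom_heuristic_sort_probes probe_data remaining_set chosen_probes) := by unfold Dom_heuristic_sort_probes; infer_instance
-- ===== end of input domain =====

-- B replaces A's materialised intersection sets and twice-recomputed sort key by an arithmetic
-- piece count and a once-built effectiveness table (objective: alternative).


-- ===== PORT A =====
-- split_versions(version_set, version_sets_by_probe); loop state = (remaining_versions, new_sets)
def split_versions (version_set : PySem.Set String) (version_sets_by_probe : List (PySem.Set String)) : List (PySem.Set String) :=
  let st := version_sets_by_probe.foldl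
    (fun (st : PySem.Set String × List (PySem.Set String)) v_set =>
      let intersection := PySem.Set.inter version_set v_set
      if intersection ≠ [] then (PySem.Set.diff st.1 intersection, st.2 ++ [intersection]) else st)
    (version_set, [])
  if st.1 ≠ [] then st.2 ++ [st.1] else st.2

-- probe_data[probe]: split_effectiveness is only called with probe ∈ keys, so getD's [] default is never used
def split_effectiveness (probe_data : List (String × List (List String))) (remaining_set : List (List String)) (probe : String) : Int :=
  let version_sets := (PySem.Dict.mk probe_data).getD probe []
  let new_sets := remaining_set.foldl (fun acc v_set => acc ++ split_versions v_set version_sets) []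
  (new_sets.length : Int) - (remaining_set.length : Int)

def heuristic_sort_probes (probe_data : List (String × List (List String))) (remaining_set : List (List String)) (chosen_probes : List String) : List String :=
  let effective_probes := ((PySem.Dict.mk probe_data).keys).filter
    (fun probe => decide (0 < split_effectiveness probe_data remaining_set probe) && !(chosen_probes.contains probe))
  PySem.List.sorted effective_probes (fun probe => split_effectiveness probe_data remaining_set probe) true

-- ===== PORT B =====
def pvEffectiveness (remaining_set : List (List String)) (version_sets : List (List String)) : Int :=
  (remaining_set.foldl
    (fun pieces vset =>
      pieces + (version_sets.countP (fun vs => vset.any (fun x => vs.contains x)) : Int)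
             + (if vset.any (fun x => version_sets.all (fun vs => !vs.contains x)) then 1 else 0))
    0)
  - (remaining_set.length : Int)

def heuristic_sort_probes_alt (probe_data : List (String × List (List String))) (remaining_set : List (List String)) (chosen_probes : List String) : List String :=
  let eff : PySem.Dict String Int :=
    probe_data.foldl (fun d pv => d.insert pv.1 (pvEffectiveness remaining_set pv.2)) PySem.Dict.empty
  let effective := (probe_data.map (fun pv => pv.1)).filter
    (fun p => decide (0 < eff.getD p 0) && !(chosen_probes.contains p))
  PySem.List.sorted effective (fun p => eff.getD p 0) true

-- ===== PRECONDITION & SPEC =====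
-- Pre_ excludes association lists with duplicate probe keys: probe_data is a Python dict, which
-- cannot hold duplicate keys, so these inputs represent no Python call of A.
def Pre_heuristic_sort_probes (probe_data : List (String × List (List String))) (remaining_set : List (List String)) (chosen_probes : List String) : Prop :=
  (probe_data.map (fun pv => pv.1)).Nodup
instance (probe_data : List (String × List (List String))) (remaining_set : List (List String)) (chosen_probes : List String) : Decidable (Pre_heuristic_sort_probes probe_data remaining_set chosen_probes) := by unfold Pre_heuristic_sort_probes; infer_instance

def pvWitness_heuristic_sort_probes : (List (String × List (List String))) × List (List String) × List String :=
  ([("a", [["x"]]), ("b", [["x"], ["y"]])], [["x", "y"]], ["b"])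

def Spec_heuristic_sort_probes (probe_data : List (String × List (List String))) (remaining_set : List (List String)) (chosen_probes : List String) (out : List String) : Prop := out = heuristic_sort_probes_alt probe_data remaining_set chosen_probes
instance (probe_data : List (String × List (List String))) (remaining_set : List (List String)) (chosen_probes : List String) (out : List String) : Decidable (Spec_heuristic_sort_probes probe_data remaining_set chosen_probes out) := by unfold Spec_heuristic_sort_probes; infer_instance

-- ===== CLAIM (what is proved, stated in full; the proofs are below) =====
def Claim_equal_heuristic_sort_probes : Prop := ∀ (probe_data : List (String × List (List String))) (remaining_set : List (List String)) (chosen_probes : List String), Dom_heuristic_sort_probes probe_data remaining_set chosen_probes → Pre_heuristic_sort_probes probe_data remaining_set chosen_probes → Spec_heuristic_sort_probes probe_data remaining_set chosen_probes (heuristic_sort_probes probe_data remaining_set chosen_probes)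

-- ===== LEMMAS AND PROOFS =====

-- A's split_versions loop, characterised: the final remaining set is the start set filtered by
-- "in no v_set", and the produced pieces count the v_sets meeting version_set.
lemma splitA (V : List String) (l : List (List String)) :
    ∀ (r : List String) (ns : List (List String)), (∀ x ∈ r, x ∈ V) →
    (l.foldl
      (fun (st : PySem.Set String × List (PySem.Set String)) v_set =>
        let intersection := PySem.Set.inter V v_set
        if intersection ≠ [] then (PySem.Set.diff st.1 intersection, st.2 ++ [intersection]) else st)
      (r, ns)).1 = r.filter (fun x => l.all (fun vs => !vs.contains x)) ∧
    (l.foldl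
      (fun (st : PySem.Set String × List (PySem.Set String)) v_set =>
        let intersection := PySem.Set.inter V v_set
        if intersection ≠ [] then (PySem.Set.diff st.1 intersection, st.2 ++ [intersection]) else st)
      (r, ns)).2.length = ns.length + l.countP (fun vs => V.any (fun x => vs.contains x)) := by
  induction l with
  | nil => intro r ns _; simp
  | cons vs l ih =>
    intro r ns hsub
    have hmem : ∀ x, x ∈ PySem.Set.inter V vs ↔ (x ∈ V ∧ x ∈ vs) := by
      intro x; simp [PySem.Set.inter, List.mem_filter]
    by_cases h : PySem.Set.inter V vs = []
    · have hno : ∀ x ∈ V, x ∉ vs := by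
        intro x hx hc
        have : x ∈ PySem.Set.inter V vs := (hmem x).2 ⟨hx, hc⟩
        rw [h] at this
        exact absurd this (by simp)
      have hany : V.any (fun x => vs.contains x) = false := by
        rw [List.any_eq_false]
        intro x hx
        simpa using hno x hx
      have hstep : (let intersection := PySem.Set.inter V vs;
          if intersection ≠ [] then (PySem.Set.diff (r, ns).1 intersection, (r, ns).2 ++ [intersection]) else (r, ns)) = ((r, ns) : PySem.Set String × List (PySem.Set String)) := by
        simp [h]
      rw [List.foldl_cons, hstep]
      refine ⟨?_, ?_⟩
      · rw [(ih r ns hsub).1]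
        apply List.filter_congr
        intro x hx
        have := hno x (hsub x hx)
        simp [this]
      · rw [(ih r ns hsub).2, List.countP_cons]
        simp only [hany, if_false, Bool.false_eq_true]
        omega
    · have hany : V.any (fun x => vs.contains x) = true := by
        obtain ⟨x, hx⟩ := List.exists_mem_of_ne_nil _ h
        rw [List.any_eq_true]
        refine ⟨x, ((hmem x).1 hx).1, ?_⟩
        simpa using ((hmem x).1 hx).2
      have hstep : (let intersection := PySem.Set.inter V vs;
          if intersection ≠ [] then (PySem.Set.diff (r, ns).1 intersection, (r, ns).2 ++ [intersection]) else (r, ns))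
          = ((PySem.Set.diff r (PySem.Set.inter V vs), ns ++ [PySem.Set.inter V vs]) : PySem.Set String × List (PySem.Set String)) := by
        simp [h]
      rw [List.foldl_cons, hstep]
      have hsub' : ∀ x ∈ PySem.Set.diff r (PySem.Set.inter V vs), x ∈ V := fun x hx =>
        hsub x (List.mem_of_mem_filter hx)
      refine ⟨?_, ?_⟩
      · rw [(ih _ _ hsub').1]
        show List.filter _ (List.filter _ r) = _
        rw [List.filter_filter]
        apply List.filter_congr
        intro x hx
        have hx' : x ∈ V := hsub x hx
        have hc : (PySem.Set.inter V vs).contains x = vs.contains x := by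
          by_cases hv : x ∈ vs
          · have : x ∈ PySem.Set.inter V vs := (hmem x).2 ⟨hx', hv⟩
            simp [this, hv]
          · have : x ∉ PySem.Set.inter V vs := fun hc => hv ((hmem x).1 hc).2
            simp [this, hv]
        simp [hx', Bool.and_comm]
      · rw [(ih _ _ hsub').2, List.countP_cons]
        simp only [hany, if_true, List.length_append, List.length_cons, List.length_nil]
        omega

lemma split_versions_length (V : List String) (l : List (List String)) :
    (split_versions V l).length
      = l.countP (fun vs => V.any (fun x => vs.contains x))
        + (if V.any (fun x => l.all (fun vs => !vs.contains x)) then 1 else 0) := by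
  obtain ⟨h1, h2⟩ := splitA V l V [] (fun x hx => hx)
  unfold split_versions
  by_cases hb : V.any (fun x => l.all (fun vs => !vs.contains x)) = true
  · have hne : V.filter (fun x => l.all (fun vs => !vs.contains x)) ≠ [] := by
      obtain ⟨x, hx, hpx⟩ := List.any_eq_true.1 hb
      intro hnil
      have : x ∈ V.filter (fun x => l.all (fun vs => !vs.contains x)) := List.mem_filter.2 ⟨hx, hpx⟩
      rw [hnil] at this
      exact absurd this (by simp)
    rw [if_pos (by rw [h1]; exact hne), hb, if_pos rfl, List.length_append, h2]
    simp
  · have hnil : V.filter (fun x => l.all (fun vs => !vs.contains x)) = [] := by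
      rw [List.filter_eq_nil_iff]
      intro x hx hpx
      exact hb (List.any_eq_true.2 ⟨x, hx, hpx⟩)
    rw [if_neg (by rw [h1, hnil]; simp), if_neg hb]
    rw [h2]
    simp

lemma eff_eq (probe_data : List (String × List (List String))) (remaining_set : List (List String)) (probe : String) :
    split_effectiveness probe_data remaining_set probe
      = pvEffectiveness remaining_set ((PySem.Dict.mk probe_data).getD probe []) := by
  simp only [split_effectiveness, pvEffectiveness]
  set Vs := (PySem.Dict.mk probe_data).getD probe [] with hVs
  rw [PySem.List.foldl_append_eq_flatMap]
  congr 1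
  have hbody : (fun (pieces : Int) (vset : List String) =>
      pieces + (List.countP (fun vs => vset.any (fun x => vs.contains x)) Vs : Int)
             + (if vset.any (fun x => Vs.all (fun vs => !vs.contains x)) then 1 else 0))
      = (fun (pieces : Int) (vset : List String) => pieces +
          ((List.countP (fun vs => vset.any (fun x => vs.contains x)) Vs : Int)
             + (if vset.any (fun x => Vs.all (fun vs => !vs.contains x)) then 1 else 0))) := by
    funext pieces vset; ring
  rw [hbody, PySem.List.foldl_add]
  simp only [List.nil_append, List.length_flatMap, zero_add]
  rw [Nat.cast_list_sum, List.map_map]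
  congr 1
  apply List.map_congr_left
  intro vset _
  simp only [Function.comp_apply, split_versions_length]
  push_cast
  ring

lemma insertBy_congr {α : Type} (p q : α → α → Bool) (x : α) (ys : List α)
    (h : ∀ y ∈ ys, p x y = q x y) : PySem.List.insertBy p x ys = PySem.List.insertBy q x ys := by
  induction ys with
  | nil => rfl
  | cons y ys ih =>
    simp only [PySem.List.insertBy]
    rw [h y (by simp)]
    by_cases hq : q x y = true
    · simp [hq]
    · simp only [Bool.not_eq_true] at hq
      simp only [hq, Bool.false_eq_true, if_false, List.cons.injEq, true_and]
      exact ih (fun z hz => h z (by simp [hz]))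

lemma foldl_insertBy_congr {α : Type} (k1 k2 : α → Int) :
    ∀ (xs acc : List α), (∀ x ∈ xs, k1 x = k2 x) → (∀ y ∈ acc, k1 y = k2 y) →
    xs.foldl (fun acc x => PySem.List.insertBy (fun a b => decide (k1 b < k1 a)) x acc) acc
      = xs.foldl (fun acc x => PySem.List.insertBy (fun a b => decide (k2 b < k2 a)) x acc) acc := by
  intro xs
  induction xs with
  | nil => intros; rfl
  | cons x xs ih =>
    intro acc hxs hacc
    simp only [List.foldl_cons]
    rw [insertBy_congr _ _ x acc (fun y hy => by rw [hxs x (by simp), hacc y hy])]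
    exact ih _ (fun z hz => hxs z (by simp [hz]))
      (fun y hy => by
        rcases (PySem.List.mem_insertBy _ _ _ _).1 hy with h' | h'
        · rw [h']; exact hxs x (by simp)
        · exact hacc y h')

-- a stable reverse sort only looks at the key on the list's members
lemma sorted_rev_key_congr {α : Type} (k1 k2 : α → Int) (xs : List α)
    (h : ∀ x ∈ xs, k1 x = k2 x) : PySem.List.sorted xs k1 true = PySem.List.sorted xs k2 true := by
  rw [PySem.List.sorted_rev_eq_foldl_insertBy, PySem.List.sorted_rev_eq_foldl_insertBy]
  exact foldl_insertBy_congr k1 k2 xs [] h (by simp)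

theorem main_eq (pd : List (String × List (List String))) (rs : List (List String)) (cp : List String)
    (hnd : (pd.map (fun pv => pv.1)).Nodup) :
    heuristic_sort_probes pd rs cp = heuristic_sort_probes_alt pd rs cp := by
  simp only [heuristic_sort_probes, heuristic_sort_probes_alt]
  set eff : PySem.Dict String Int :=
    pd.foldl (fun d pv => d.insert pv.1 (pvEffectiveness rs pv.2)) PySem.Dict.empty with heff
  have hitems : eff.items = pd.map (fun pv => (pv.1, pvEffectiveness rs pv.2)) := by
    rw [heff]
    have := PySem.Dict.items_foldl_insert_fresh pd (fun pv => pv.1)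
      (fun pv => pvEffectiveness rs pv.2) PySem.Dict.empty (by intro a _; simp) hnd
    simpa using this
  have hknd : eff.keys.Nodup := by
    simp only [PySem.Dict.keys, hitems, List.map_map]
    simpa using hnd
  have hgetD : ∀ p ∈ pd.map (fun pv => pv.1), eff.getD p 0 = split_effectiveness pd rs p := by
    intro p hp
    obtain ⟨pv, hpv, rfl⟩ := List.mem_map.1 hp
    have h1 : (pv.1, pvEffectiveness rs pv.2) ∈ eff.items := by
      rw [hitems]; exact List.mem_map_of_mem hpv
    rw [PySem.Dict.getD_of_mem_items eff h1 hknd 0, eff_eq]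
    congr 1
    have h2 : (pv.1, pv.2) ∈ (PySem.Dict.mk pd).items := hpv
    rw [PySem.Dict.getD_of_mem_items _ h2 (by simpa [PySem.Dict.keys] using hnd) []]
  have hkeys : (PySem.Dict.mk pd).keys = pd.map (fun pv => pv.1) := by
    simp [PySem.Dict.keys]
  rw [hkeys]
  have hfilter : (pd.map (fun pv => pv.1)).filter
      (fun probe => decide (0 < split_effectiveness pd rs probe) && !(cp.contains probe))
      = (pd.map (fun pv => pv.1)).filter
      (fun p => decide (0 < eff.getD p 0) && !(cp.contains p)) := by
    apply List.filter_congr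
    intro p hp
    rw [hgetD p hp]
  rw [hfilter]
  apply sorted_rev_key_congr
  intro p hp
  have hp' : p ∈ pd.map (fun pv => pv.1) := List.mem_of_mem_filter hp
  rw [hgetD p hp']

-- ===== VERDICT (by name: the statement is the Claim_ definition above) =====
theorem heuristic_sort_probes_spec : Claim_equal_heuristic_sort_probes := by
  intro probe_data remaining_set chosen_probes _ hpre
  unfold Pre_heuristic_sort_probes at hpre
  unfold Spec_heuristic_sort_probes
  exact main_eq probe_data remaining_set chosen_probes hpre
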